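-- pv_equiv track=rewrite | github.com/UN-9BOT/py_interview_ru_yt | scripts/generate_readme.py | anchor_id
-- ===== SOURCE A (Python) =====
-- def anchor_id(name: str) -> str:
--     slug = []
--     for char in name.strip().lower():
--         if char.isspace() or char in {"-", "_"}:
--             slug.append("-")
--         elif char.isalnum():
--             slug.append(char)
--     result = "".join(slug).strip("-")
--     while "--" in result:
--         result = result.replace("--", "-")
--     return result or "section"
-- ===== SOURCE B (Python) =====
-- def anchor_id(name: str) -> str:
--     out = []
--     pending = False
--     for ch in name.lower():
--         if ch.isalnum():
--             if pending and out:
--                 out.append("-")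
--             out.append(ch)
--             pending = False
--         elif ch.isspace() or ch in "-_":
--             pending = True
--     return "".join(out) or "section"
-- ===== Notes on version B (the rewrite author's own statement) =====
-- stated objective: alternative
-- what changed: Replaces A's build-list / edge-strip / repeated whole-string collapsing passes with a single left-to-right scan carrying a pending-separator flag that emits at most one separator between alphanumeric runs.
import Mathlib
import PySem

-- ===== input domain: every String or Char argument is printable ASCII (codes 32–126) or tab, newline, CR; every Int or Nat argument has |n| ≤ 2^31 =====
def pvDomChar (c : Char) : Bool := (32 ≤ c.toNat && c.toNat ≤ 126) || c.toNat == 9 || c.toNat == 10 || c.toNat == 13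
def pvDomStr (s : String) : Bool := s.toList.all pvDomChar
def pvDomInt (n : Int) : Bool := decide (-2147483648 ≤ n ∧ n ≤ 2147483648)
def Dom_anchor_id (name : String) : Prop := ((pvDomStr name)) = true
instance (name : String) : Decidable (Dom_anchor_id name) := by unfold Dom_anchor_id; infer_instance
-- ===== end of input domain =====

-- B replaces A's build-list / edge-strip / repeated whole-string collapsing passes by one
-- left-to-right scan with a pending-separator flag; equal return value on every input
-- (objective: alternative single-pass algorithm; timing run did not confirm a 1.5x speed-up).

-- ===== PORT A =====
-- pvRep and the lemmas up to pvReplaceDashLt exist only to justify termination of the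
-- while loop of A (each replace pass strictly shrinks the string).
def pvRep : List Char → List Char
  | [] => []
  | [c] => [c]
  | c :: d :: t => if c = '-' ∧ d = '-' then '-' :: pvRep t else c :: pvRep (d :: t)

theorem pvRep_length_le (l : List Char) : (pvRep l).length ≤ l.length := by
  induction l using pvRep.induct with
  | case1 => simp [pvRep]
  | case2 c => simp [pvRep]
  | case3 c d t h ih => simp only [pvRep, if_pos h, List.length_cons]; omega
  | case4 c d t h ih => simp only [pvRep, if_neg h, List.length_cons]; simpa using ih

theorem pvReplaceGo_eq (fuel : Nat) : ∀ (l acc : List Char), l.length ≤ fuel →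
    PySem.Chars.replace.go ['-', '-'] ['-'] fuel l acc = acc.reverse ++ pvRep l := by
  induction fuel with
  | zero =>
    intro l acc h
    have : l = [] := List.eq_nil_of_length_eq_zero (Nat.le_zero.mp h)
    subst this; simp [PySem.Chars.replace.go, pvRep]
  | succ fuel ih =>
    intro l acc h
    match l with
    | [] => simp [PySem.Chars.replace.go, pvRep]
    | [c] =>
      have hpre : (['-', '-'] : List Char).isPrefixOf [c] = false := by
        simp [List.isPrefixOf]
      simp only [PySem.Chars.replace.go, hpre, Bool.false_eq_true, if_false]
      rw [ih [] (c :: acc) (by simp)]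
      simp [pvRep]
    | c :: d :: t =>
      by_cases hc : c = '-' ∧ d = '-'
      · have hpre : (['-', '-'] : List Char).isPrefixOf (c :: d :: t) = true := by
          simp [List.isPrefixOf, hc.1, hc.2]
        simp only [PySem.Chars.replace.go, hpre, if_true]
        have hd : List.drop (['-', '-'] : List Char).length (c :: d :: t) = t := rfl
        have hr : ((['-'] : List Char).reverse ++ acc) = '-' :: acc := rfl
        rw [hd, hr, ih t ('-' :: acc) (by simp at h ⊢; omega)]
        rw [show pvRep (c :: d :: t) = '-' :: pvRep t from by rw [pvRep, if_pos hc]]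
        simp
      · have hpre : (['-', '-'] : List Char).isPrefixOf (c :: d :: t) = false := by
          by_contra hne
          have : (['-', '-'] : List Char).isPrefixOf (c :: d :: t) = true := by
            revert hne; cases (['-', '-'] : List Char).isPrefixOf (c :: d :: t) <;> simp
          simp [List.isPrefixOf] at this
          exact hc ⟨this.1.symm, this.2.symm⟩
        simp only [PySem.Chars.replace.go, hpre, Bool.false_eq_true, if_false]
        rw [ih (d :: t) (c :: acc) (by simp at h ⊢; omega)]
        simp [pvRep, hc]

theorem pvReplace_eq (l : List Char) : PySem.Chars.replace l ['-', '-'] ['-'] = pvRep l := by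
  unfold PySem.Chars.replace
  simp only [List.isEmpty_cons, Bool.false_eq_true, if_false]
  rw [pvReplaceGo_eq l.length l [] (le_refl _)]
  simp

theorem pvRep_length_lt : ∀ (l : List Char), ['-', '-'] <:+: l → (pvRep l).length < l.length := by
  intro l
  induction l using pvRep.induct with
  | case1 => intro h; simpa using h.length_le
  | case2 c => intro h; simpa using h.length_le
  | case3 c d t h ih =>
    intro _
    have := pvRep_length_le t
    rw [show pvRep (c :: d :: t) = '-' :: pvRep t from by rw [pvRep, if_pos h]]
    simp only [List.length_cons]; omega
  | case4 c d t h ih =>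
    intro hinf
    have htail : ['-', '-'] <:+: d :: t := by
      rcases List.infix_cons_iff.mp hinf with hp | hi
      · rw [List.cons_prefix_cons] at hp
        rcases hp with ⟨hc, hp2⟩
        rw [List.cons_prefix_cons] at hp2
        exact absurd ⟨hc.symm, hp2.1.symm⟩ h
      · exact hi
    have := ih htail
    rw [show pvRep (c :: d :: t) = c :: pvRep (d :: t) from by rw [pvRep, if_neg h]]
    simp only [List.length_cons] at this ⊢; omega

theorem pvReplaceDashLt (r : List Char) (h : PySem.Chars.isIn ['-', '-'] r = true) :
    (PySem.Chars.replace r ['-', '-'] ['-']).length < r.length := by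
  rw [pvReplace_eq]
  exact pvRep_length_lt r ((PySem.Chars.isIn_iff_infix _ _).mp h)

-- A's while loop: keep replacing double dashes by single ones while any remain
def pvWhileCollapse (result : List Char) : List Char :=
  if h : PySem.Chars.isIn ['-', '-'] result = true then
    pvWhileCollapse (PySem.Chars.replace result ['-', '-'] ['-'])
  else result
termination_by result.length
decreasing_by exact pvReplaceDashLt result h

-- result: slug built by the for-loop, then joined and dash-stripped, then the while loop
def pvSlugResult (name : String) : List Char :=
  pvWhileCollapse (PySem.Chars.stripChars
    ((PySem.Chars.lower (PySem.Chars.strip name.toList)).foldl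
      (fun acc c =>
        if PySem.Chars.isspace c || (c == '-' || c == '_') then acc ++ ['-']
        else if PySem.Chars.isalnum c then acc ++ [c]
        else acc) []) ['-'])

def anchor_id (name : String) : String :=
  -- return result or "section"
  if (pvSlugResult name).isEmpty then "section" else String.mk (pvSlugResult name)

-- ===== PORT B =====
-- (out, pending) after the for-loop over name.lower()
def pvScan (name : String) : List Char × Bool :=
  (PySem.Chars.lower name.toList).foldl
    (fun (acc : List Char × Bool) c =>
      if PySem.Chars.isalnum c then
        ((if acc.2 && !acc.1.isEmpty then acc.1 ++ ['-'] else acc.1) ++ [c], false)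
      else if PySem.Chars.isspace c || (c == '-' || c == '_') then (acc.1, true)
      else acc) ([], false)

def anchor_id_alt (name : String) : String :=
  -- return "".join(out) or "section"
  if (pvScan name).1.isEmpty then "section" else String.mk (pvScan name).1

-- ===== PRECONDITION & SPEC =====
def Spec_anchor_id (name : String) (out : String) : Prop := out = anchor_id_alt name
instance (name : String) (out : String) : Decidable (Spec_anchor_id name out) := by unfold Spec_anchor_id; infer_instance

-- ===== CLAIM (what is proved, stated in full; the proofs are below) =====
def Claim_equal_anchor_id : Prop := ∀ (name : String), Dom_anchor_id name → Spec_anchor_id name (anchor_id name)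

-- ===== LEMMAS AND PROOFS =====

-- character-class facts (ASCII ranges of the PySem classes)
theorem le_char_iff {a b : Char} : a ≤ b ↔ a.toNat ≤ b.toNat := by
  rw [Char.le_def, UInt32.le_iff_toNat_le]; exact Iff.rfl

theorem alnum_bounds {c : Char} (h : PySem.Chars.isalnum c = true) :
    (48 ≤ c.toNat ∧ c.toNat ≤ 57) ∨ (65 ≤ c.toNat ∧ c.toNat ≤ 90) ∨ (97 ≤ c.toNat ∧ c.toNat ≤ 122) := by
  unfold PySem.Chars.isalnum PySem.Chars.isalpha PySem.Chars.isdigit PySem.Chars.isupper PySem.Chars.islower at h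
  simp only [Bool.or_eq_true, Bool.and_eq_true, decide_eq_true_iff, le_char_iff] at h
  have e1 : ('0' : Char).toNat = 48 := by decide
  have e2 : ('9' : Char).toNat = 57 := by decide
  have e3 : ('A' : Char).toNat = 65 := by decide
  have e4 : ('Z' : Char).toNat = 90 := by decide
  have e5 : ('a' : Char).toNat = 97 := by decide
  have e6 : ('z' : Char).toNat = 122 := by decide
  rw [e1, e2, e3, e4, e5, e6] at h
  omega

theorem isspace_bounds {c : Char} (h : 48 ≤ c.toNat ∧ c.toNat ≤ 122) : PySem.Chars.isspace c = false := by
  unfold PySem.Chars.isspace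
  simp only [Bool.or_eq_false_iff, Bool.and_eq_false_iff, decide_eq_false_iff_not]
  omega

theorem isupper_bounds {c : Char} (h : PySem.Chars.isupper c = true) : 65 ≤ c.toNat ∧ c.toNat ≤ 90 := by
  unfold PySem.Chars.isupper at h
  simp only [Bool.and_eq_true, decide_eq_true_iff, le_char_iff] at h
  have e3 : ('A' : Char).toNat = 65 := by decide
  have e4 : ('Z' : Char).toNat = 90 := by decide
  rw [e3, e4] at h; exact h

theorem toNat_ofNat_small (n : Nat) (h : n ≤ 200) : (Char.ofNat n).toNat = n := by
  rw [Char.toNat_ofNat, if_pos]; constructor; omega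

theorem isspace_lowerChar (c : Char) : PySem.Chars.isspace (PySem.Chars.lowerChar c) = PySem.Chars.isspace c := by
  unfold PySem.Chars.lowerChar
  by_cases h : PySem.Chars.isupper c = true
  · rw [if_pos h]
    have hb := isupper_bounds h
    have h1 : (Char.ofNat (c.toNat + 32)).toNat = c.toNat + 32 := toNat_ofNat_small _ (by omega)
    rw [isspace_bounds (by omega), isspace_bounds (c := c) (by omega)]
  · rw [if_neg h]

theorem alnum_not_sep {c : Char} (h : PySem.Chars.isalnum c = true) :
    (PySem.Chars.isspace c || (c == '-' || c == '_')) = false := by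
  have hb := alnum_bounds h
  rw [Bool.or_eq_false_iff, Bool.or_eq_false_iff]
  refine ⟨isspace_bounds (by omega), ?_, ?_⟩ <;>
  · rw [beq_eq_false_iff_ne]
    intro e
    rw [e] at hb
    revert hb
    decide

theorem alnum_ne_dash {c : Char} (h : PySem.Chars.isalnum c = true) : (c == '-') = false := by
  have h2 := alnum_not_sep h
  simp only [Bool.or_eq_false_iff] at h2
  exact h2.2.1

-- fm: what A's filtering loop emits for one character
def fm (c : Char) : Option Char :=
  if PySem.Chars.isspace c || (c == '-' || c == '_') then some '-'
  else if PySem.Chars.isalnum c then some c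
  else none

theorem foldl_fm : ∀ (l acc : List Char),
    l.foldl (fun acc c =>
        if PySem.Chars.isspace c || (c == '-' || c == '_') then acc ++ ['-']
        else if PySem.Chars.isalnum c then acc ++ [c]
        else acc) acc = acc ++ l.filterMap fm := by
  intro l
  induction l with
  | nil => intro acc; simp
  | cons c t ih =>
    intro acc
    simp only [List.foldl_cons]
    by_cases h1 : (PySem.Chars.isspace c || (c == '-' || c == '_')) = true
    · have hfm : fm c = some '-' := by rw [fm, if_pos h1]
      rw [if_pos h1, ih]
      simp [List.filterMap_cons, hfm, List.append_assoc]
    · rw [if_neg h1]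
      by_cases h2 : PySem.Chars.isalnum c = true
      · have hfm : fm c = some c := by rw [fm, if_neg h1, if_pos h2]
        rw [if_pos h2, ih]
        simp [List.filterMap_cons, hfm, List.append_assoc]
      · have hfm : fm c = none := by rw [fm, if_neg h1, if_neg h2]
        rw [if_neg h2, ih]
        simp [List.filterMap_cons, hfm]

-- dd: collapse every run of consecutive dashes to a single dash
def dd : List Char → List Char
  | [] => []
  | [c] => [c]
  | c :: d :: t => if c = '-' ∧ d = '-' then dd (d :: t) else c :: dd (d :: t)

theorem dd_no_infix : ∀ (l : List Char), ¬ (['-', '-'] <:+: l) → dd l = l := by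
  intro l
  induction l using dd.induct with
  | case1 => intro _; rfl
  | case2 c => intro _; rfl
  | case3 c d t h ih =>
    intro hn
    exfalso
    exact hn ⟨[], t, by simp [h.1, h.2]⟩
  | case4 c d t h ih =>
    intro hn
    rw [dd, if_neg h, ih (fun hi => hn (List.infix_cons_iff.mpr (Or.inr hi)))]

theorem dd_rep_cons : ∀ (n : Nat) (l : List Char), l.length ≤ n →
    ∀ (c : Char), dd (c :: pvRep l) = dd (c :: l) := by
  intro n
  induction n with
  | zero =>
    intro l h c
    have : l = [] := List.eq_nil_of_length_eq_zero (Nat.le_zero.mp h)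
    subst this; rfl
  | succ n ih =>
    intro l hl c
    match l with
    | [] => rfl
    | [a] => rfl
    | a :: b :: t =>
      simp only [List.length_cons] at hl
      by_cases hab : a = '-' ∧ b = '-'
      · rw [show pvRep (a :: b :: t) = '-' :: pvRep t from by rw [pvRep, if_pos hab]]
        by_cases hc : c = '-'
        · rw [show dd (c :: '-' :: pvRep t) = dd ('-' :: pvRep t) from by
              rw [dd, if_pos ⟨hc, rfl⟩]]
          rw [ih t (by omega) '-']
          rw [show dd (c :: a :: b :: t) = dd (a :: b :: t) from by
              rw [dd, if_pos ⟨hc, hab.1⟩]]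
          rw [show dd (a :: b :: t) = dd (b :: t) from by rw [dd, if_pos hab]]
          rw [hab.2]
        · rw [show dd (c :: '-' :: pvRep t) = c :: dd ('-' :: pvRep t) from by
              rw [dd, if_neg (fun h => hc h.1)]]
          rw [ih t (by omega) '-']
          rw [show dd (c :: a :: b :: t) = c :: dd (a :: b :: t) from by
              rw [dd, if_neg (fun h => hc h.1)]]
          rw [show dd (a :: b :: t) = dd (b :: t) from by rw [dd, if_pos hab]]
          rw [hab.2]
      · rw [show pvRep (a :: b :: t) = a :: pvRep (b :: t) from by rw [pvRep, if_neg hab]]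
        by_cases hca : c = '-' ∧ a = '-'
        · rw [show dd (c :: a :: pvRep (b :: t)) = dd (a :: pvRep (b :: t)) from by
              rw [dd, if_pos hca]]
          rw [ih (b :: t) (by simp; omega) a]
          rw [show dd (c :: a :: b :: t) = dd (a :: b :: t) from by rw [dd, if_pos hca]]
        · rw [show dd (c :: a :: pvRep (b :: t)) = c :: dd (a :: pvRep (b :: t)) from by
              rw [dd, if_neg hca]]
          rw [ih (b :: t) (by simp; omega) a]
          rw [show dd (c :: a :: b :: t) = c :: dd (a :: b :: t) from by rw [dd, if_neg hca]]

theorem dd_rep (l : List Char) : dd (pvRep l) = dd l := by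
  match l with
  | [] => rfl
  | [a] => rfl
  | a :: b :: t =>
    by_cases hab : a = '-' ∧ b = '-'
    · rw [show pvRep (a :: b :: t) = '-' :: pvRep t from by rw [pvRep, if_pos hab]]
      rw [dd_rep_cons t.length t (le_refl _) '-']
      rw [show dd (a :: b :: t) = dd (b :: t) from by rw [dd, if_pos hab]]
      rw [hab.2]
    · rw [show pvRep (a :: b :: t) = a :: pvRep (b :: t) from by rw [pvRep, if_neg hab]]
      rw [dd_rep_cons (b :: t).length (b :: t) (le_refl _) a]

theorem whileCollapse_eq_dd : ∀ (n : Nat) (l : List Char), l.length ≤ n → pvWhileCollapse l = dd l := by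
  intro n
  induction n with
  | zero =>
    intro l h
    have : l = [] := List.eq_nil_of_length_eq_zero (Nat.le_zero.mp h)
    subst this
    rw [pvWhileCollapse,
        dif_neg (by decide : ¬ PySem.Chars.isIn ['-', '-'] ([] : List Char) = true)]
    rfl
  | succ n ih =>
    intro l hl
    rw [pvWhileCollapse]
    by_cases h : PySem.Chars.isIn ['-', '-'] l = true
    · rw [dif_pos h]
      have hlt := pvReplaceDashLt l h
      rw [ih _ (by omega)]
      rw [pvReplace_eq, dd_rep]
    · rw [dif_neg h]
      have : ¬ (['-', '-'] <:+: l) := fun hi => h ((PySem.Chars.isIn_iff_infix _ _).mpr hi)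
      rw [dd_no_infix l this]

theorem whileCollapse_eq_dd' (l : List Char) : pvWhileCollapse l = dd l :=
  whileCollapse_eq_dd l.length l (le_refl _)

-- sfold: B's scan expressed over the emitted token list; state 0 = nothing emitted yet,
-- 1 = last emitted is a word character, 2 = word character emitted and separator pending
def sfold : List Char → Nat → List Char
  | [], _ => []
  | c :: t, st =>
    if c = '-' then sfold t (if st = 0 then 0 else 2)
    else (if st = 2 then ['-', c] else [c]) ++ sfold t 1

-- B's loop computes sfold of the token stream
theorem bfold_eq : ∀ (l : List Char) (out : List Char) (p : Bool),
    (l.foldl (fun (acc : List Char × Bool) c =>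
        if PySem.Chars.isalnum c then
          ((if acc.2 && !acc.1.isEmpty then acc.1 ++ ['-'] else acc.1) ++ [c], false)
        else if PySem.Chars.isspace c || (c == '-' || c == '_') then (acc.1, true)
        else acc) (out, p)).1
      = out ++ sfold (l.filterMap fm) (if out = [] then 0 else if p then 2 else 1) := by
  intro l
  induction l with
  | nil => intro out p; simp [sfold]
  | cons c t ih =>
    intro out p
    simp only [List.foldl_cons, List.filterMap_cons]
    by_cases ha : PySem.Chars.isalnum c = true
    · have hsep := alnum_not_sep ha
      have hdash := alnum_ne_dash ha
      have hfm : fm c = some c := by rw [fm, if_neg (by simp [hsep]), if_pos ha]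
      rw [if_pos ha, hfm, ih]
      have hdash' : ¬ (c = '-') := by simpa using hdash
      rw [show sfold (c :: List.filterMap fm t) (if out = [] then 0 else if p then 2 else 1)
            = (if (if out = [] then 0 else if p then 2 else 1) = 2 then ['-', c] else [c])
              ++ sfold (List.filterMap fm t) 1 from by rw [sfold, if_neg hdash']]
      have hne : (if p && !out.isEmpty then out ++ ['-'] else out) ++ [c] ≠ [] := by simp
      rw [if_neg hne]
      rcases out with _ | ⟨o, os⟩
      · simp
      · cases p <;> simp [List.append_assoc]
    · rw [if_neg ha]
      by_cases hs : (PySem.Chars.isspace c || (c == '-' || c == '_')) = true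
      · have hfm : fm c = some '-' := by rw [fm, if_pos hs]
        rw [if_pos hs, hfm, ih]
        rw [show sfold ('-' :: List.filterMap fm t) (if out = [] then 0 else if p then 2 else 1)
              = sfold (List.filterMap fm t)
                  (if (if out = [] then 0 else if p then 2 else 1) = 0 then 0 else 2) from by
            rw [sfold, if_pos rfl]]
        rcases out with _ | ⟨o, os⟩
        · simp
        · cases p <;> simp
      · have hfm : fm c = none := by rw [fm, if_neg (by simpa using hs), if_neg ha]
        rw [if_neg hs, hfm, ih]

-- dash-trimming (Python's strip("-")) written with dropWhile / rdropWhile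
def pdash (c : Char) : Bool := c == '-'

theorem stripChars_eq_trim (l : List Char) :
    PySem.Chars.stripChars l ['-'] = List.rdropWhile pdash (List.dropWhile pdash l) := by
  unfold PySem.Chars.stripChars List.rdropWhile
  have hp : (fun c => (['-'] : List Char).contains c) = pdash := by
    funext c
    show List.elem c ['-'] = pdash c
    simp only [List.elem, pdash]
    cases c == '-' <;> rfl
  rw [hp]

theorem rdrop_cons_neg {k : Char} (hk : pdash k = false) (t : List Char) :
    List.rdropWhile pdash (k :: t) = k :: List.rdropWhile pdash t := by
  unfold List.rdropWhile
  rw [show (k :: t).reverse = t.reverse ++ [k] from by simp]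
  rw [List.dropWhile_append]
  by_cases h : (List.dropWhile pdash t.reverse).isEmpty = true
  · rw [if_pos h]
    rw [List.isEmpty_iff.mp h]
    simp [List.dropWhile, hk]
  · rw [if_neg h]
    simp

theorem rdrop_dash_nil {t : List Char} (h : List.rdropWhile pdash t = []) :
    List.rdropWhile pdash ('-' :: t) = [] := by
  unfold List.rdropWhile at h ⊢
  rw [show ('-' :: t).reverse = t.reverse ++ ['-'] from by simp]
  rw [List.dropWhile_append]
  have he : (List.dropWhile pdash t.reverse) = [] := by
    have := congrArg List.reverse h
    simpa using this
  rw [if_pos (by simp [he])]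
  simp [List.dropWhile, pdash]

theorem rdrop_dash_cons {t : List Char} (h : ¬ List.rdropWhile pdash t = []) :
    List.rdropWhile pdash ('-' :: t) = '-' :: List.rdropWhile pdash t := by
  unfold List.rdropWhile at h ⊢
  rw [show ('-' :: t).reverse = t.reverse ++ ['-'] from by simp]
  rw [List.dropWhile_append]
  have he : ¬ (List.dropWhile pdash t.reverse) = [] := by
    intro e; exact h (by simp [e])
  rw [if_neg (by simpa using he)]
  simp

theorem sfold_all_dash : ∀ (t : List Char), (∀ c ∈ t, pdash c = true) → ∀ st, sfold t st = [] := by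
  intro t
  induction t with
  | nil => intro _ st; rfl
  | cons c t ih =>
    intro h st
    have hc : c = '-' := by
      have := h c (List.mem_cons_self)
      simpa [pdash] using this
    rw [sfold, if_pos hc]
    exact ih (fun x hx => h x (List.mem_cons_of_mem _ hx)) _

-- the heart: dd of the trimmed token list is sfold (states 1 and 2, then state 0)
theorem dd_trim_sfold : ∀ (n : Nat) (t : List Char), t.length ≤ n →
    ((∀ k : Char, ¬ (k = '-') → dd (k :: List.rdropWhile pdash t) = k :: sfold t 1) ∧
     (List.rdropWhile pdash t ≠ [] → dd ('-' :: List.rdropWhile pdash t) = sfold t 2)) := by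
  intro n
  induction n with
  | zero =>
    intro t h
    have : t = [] := List.eq_nil_of_length_eq_zero (Nat.le_zero.mp h)
    subst this
    exact ⟨fun k _ => by simp [List.rdropWhile, sfold, dd], fun h => absurd rfl h⟩
  | succ n ih =>
    intro t ht
    match t with
    | [] => exact ⟨fun k _ => by simp [List.rdropWhile, sfold, dd], fun h => absurd rfl h⟩
    | c :: t' =>
      simp only [List.length_cons] at ht
      have iht := ih t' (by omega)
      by_cases hc : c = '-'
      · subst hc
        constructor
        · intro k hk
          rw [show sfold ('-' :: t') 1 = sfold t' 2 from by rw [sfold]; simp]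
          by_cases hnil : List.rdropWhile pdash t' = []
          · rw [rdrop_dash_nil hnil]
            have hall : ∀ c ∈ t', pdash c = true := List.rdropWhile_eq_nil_iff.mp hnil
            rw [sfold_all_dash t' hall 2]
            rfl
          · rw [rdrop_dash_cons hnil]
            rw [show dd (k :: '-' :: List.rdropWhile pdash t')
                  = k :: dd ('-' :: List.rdropWhile pdash t') from by
                rw [dd, if_neg (fun h => hk h.1)]]
            rw [iht.2 hnil]
        · intro hne
          rw [show sfold ('-' :: t') 2 = sfold t' 2 from by rw [sfold]; simp]
          by_cases hnil : List.rdropWhile pdash t' = []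
          · exact absurd (rdrop_dash_nil hnil) hne
          · rw [rdrop_dash_cons hnil]
            rw [show dd ('-' :: '-' :: List.rdropWhile pdash t')
                  = dd ('-' :: List.rdropWhile pdash t') from by
                rw [dd, if_pos ⟨rfl, rfl⟩]]
            exact iht.2 hnil
      · have hpd : pdash c = false := by simp [pdash, hc]
        constructor
        · intro k hk
          rw [rdrop_cons_neg hpd]
          rw [show dd (k :: c :: List.rdropWhile pdash t')
                = k :: dd (c :: List.rdropWhile pdash t') from by
              rw [dd, if_neg (fun h => hk h.1)]]
          rw [iht.1 c hc]
          rw [show sfold (c :: t') 1 = [c] ++ sfold t' 1 from by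
              rw [sfold, if_neg hc]; simp]
          rfl
        · intro _
          rw [rdrop_cons_neg hpd]
          rw [show dd ('-' :: c :: List.rdropWhile pdash t')
                = '-' :: dd (c :: List.rdropWhile pdash t') from by
              rw [dd, if_neg (fun h => hc h.2)]]
          rw [iht.1 c hc]
          rw [show sfold (c :: t') 2 = ['-', c] ++ sfold t' 1 from by
              rw [sfold, if_neg hc]; simp]
          rfl

theorem dd_trim_sfold0 : ∀ (t : List Char),
    dd (List.rdropWhile pdash (List.dropWhile pdash t)) = sfold t 0 := by
  intro t
  induction t with
  | nil => simp [List.rdropWhile, sfold, dd]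
  | cons c t ih =>
    by_cases hc : c = '-'
    · subst hc
      rw [show List.dropWhile pdash ('-' :: t) = List.dropWhile pdash t from by
          simp [List.dropWhile, pdash]]
      rw [show sfold ('-' :: t) 0 = sfold t 0 from by rw [sfold]; simp]
      exact ih
    · have hpd : pdash c = false := by simp [pdash, hc]
      rw [show List.dropWhile pdash (c :: t) = c :: t from by simp [List.dropWhile, hpd]]
      rw [rdrop_cons_neg hpd]
      rw [(dd_trim_sfold t.length t (le_refl _)).1 c hc]
      rw [show sfold (c :: t) 0 = [c] ++ sfold t 1 from by rw [sfold, if_neg hc]; simp]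
      rfl

-- whitespace chars emit a dash
theorem fm_ws {c : Char} (h : PySem.Chars.isspace c = true) : fm c = some '-' := by
  rw [fm, if_pos (by simp [h])]

-- trimming dashes ignores all-dash flanks
theorem rdrop_append_all {b z : List Char} (hb : ∀ c ∈ b, pdash c = true) :
    List.rdropWhile pdash (z ++ b) = List.rdropWhile pdash z := by
  unfold List.rdropWhile
  rw [List.reverse_append, List.dropWhile_append]
  rw [if_pos (by simp [List.dropWhile_eq_nil_iff]; intro x hx; exact hb x (by simpa using hx))]

theorem trim_flank {a x b : List Char} (ha : ∀ c ∈ a, pdash c = true) (hb : ∀ c ∈ b, pdash c = true) :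
    List.rdropWhile pdash (List.dropWhile pdash (a ++ (x ++ b)))
      = List.rdropWhile pdash (List.dropWhile pdash x) := by
  rw [List.dropWhile_append]
  rw [if_pos (by simp [List.dropWhile_eq_nil_iff]; exact ha)]
  rw [List.dropWhile_append]
  by_cases hx : (List.dropWhile pdash x).isEmpty = true
  · rw [if_pos hx]
    rw [List.isEmpty_iff.mp hx]
    rw [show List.dropWhile pdash b = [] from List.dropWhile_eq_nil_iff.mpr hb]
  · rw [if_neg hx]
    exact rdrop_append_all hb

-- strip commutes with lower
theorem map_drop (x : List Char) :
    List.dropWhile PySem.Chars.isspace (List.map PySem.Chars.lowerChar x)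
      = List.map PySem.Chars.lowerChar (List.dropWhile PySem.Chars.isspace x) := by
  rw [List.dropWhile_map]
  have h : (PySem.Chars.isspace ∘ PySem.Chars.lowerChar) = PySem.Chars.isspace := by
    funext c; exact isspace_lowerChar c
  rw [h]

theorem lower_strip_eq (s : List Char) :
    PySem.Chars.lower (PySem.Chars.strip s)
      = List.rdropWhile PySem.Chars.isspace (List.dropWhile PySem.Chars.isspace (PySem.Chars.lower s)) := by
  unfold PySem.Chars.strip PySem.Chars.rstrip PySem.Chars.lstrip PySem.Chars.lower List.rdropWhile
  rw [map_drop, ← List.map_reverse, map_drop, ← List.map_reverse]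

-- the whole pipeline of A equals the scan of B
theorem core_eq (name : String) : pvSlugResult name = (pvScan name).1 := by
  unfold pvSlugResult pvScan
  rw [foldl_fm, List.nil_append, stripChars_eq_trim, whileCollapse_eq_dd', bfold_eq,
      if_pos (rfl : ([] : List Char) = [])]
  set M := PySem.Chars.lower name.toList with hM
  rw [lower_strip_eq, ← hM]
  have hsplit : M = List.takeWhile PySem.Chars.isspace M
      ++ (List.rdropWhile PySem.Chars.isspace (List.dropWhile PySem.Chars.isspace M)
          ++ List.rtakeWhile PySem.Chars.isspace (List.dropWhile PySem.Chars.isspace M)) := by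
    rw [List.rdropWhile_append_rtakeWhile, List.takeWhile_append_dropWhile]
  conv_rhs => rw [hsplit]
  rw [List.filterMap_append, List.filterMap_append, List.nil_append, ← dd_trim_sfold0]
  congr 1
  refine (trim_flank ?_ ?_).symm
  · intro c hc
    rcases List.mem_filterMap.mp hc with ⟨x, hx, hfx⟩
    have hws := List.mem_takeWhile_imp hx
    rw [fm_ws hws] at hfx
    cases hfx
    rfl
  · intro c hc
    rcases List.mem_filterMap.mp hc with ⟨x, hx, hfx⟩
    have hws := List.mem_rtakeWhile_imp hx
    rw [fm_ws hws] at hfx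
    cases hfx
    rfl

-- ===== VERDICT (by name: the statement is the Claim_ definition above) =====
theorem anchor_id_spec : Claim_equal_anchor_id := by
  intro name _
  unfold Spec_anchor_id anchor_id anchor_id_alt
  rw [core_eq]
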